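-- pv_equiv track=rewrite | github.com/akanksha86/governance-metadata-propagation | tests/test_sql_logic.py | describe_sql_logic
-- ===== SOURCE A (Python) =====
-- from typing import Optional
--
-- def describe_sql_logic(expr: Optional[str]) -> str:
--     """Converts SQL expression into natural language hint."""
--     if not expr: return ""
--
--     expr_upper = expr.upper()
--
--     # 1. Type Conversion
--     if "CAST(" in expr_upper or "SAFE_CAST(" in expr_upper:
--         return " (Converted data type)"
--
--     # 2. Null Handling
--     if any(kw in expr_upper for kw in ["COALESCE(", "IFNULL(", "NULLIF("]):
--         return " (Handles missing values)"
--
--     # 3. Numerical Operations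
--     if any(kw in expr_upper for kw in ["ROUND(", "CEIL(", "FLOOR(", "TRUNC("]):
--         return " (Numerical rounding applied)"
--     if any(op in expr for op in ["*", "/", "+", "-"]) and any(char.isdigit() for char in expr):
--         return " (Value adjustment applied)"
--
--     # 4. String Formatting
--     if any(kw in expr_upper for kw in ["UPPER(", "LOWER(", "TRIM(", "CONCAT(", "SUBSTR("]):
--         return " (String formatting applied)"
--
--     # 5. Date/Time Extractions
--     if "EXTRACT(" in expr_upper:
--         return " (Date/Time component extracted)"
--
--     # 6. Logical Branching
--     if "CASE" in expr_upper or "IF(" in expr_upper: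
--         return " (Conditional logic applied)"
--
--     # 7. Safe Execution
--     if "SAFE." in expr_upper:
--         return " (Safe execution applied)"
--
--     return f" (Calculated via logic: `{expr}`)"
-- ===== SOURCE B (Python) =====
-- def _match_ci(s, i, kw):
--     """True iff kw (already uppercase) matches s at position i, case-insensitively."""
--     if i + len(kw) > len(s):
--         return False
--     for j in range(len(kw)):
--         if s[i + j].upper() != kw[j]:
--             return False
--     return True
--
--
-- def describe_sql_logic(expr):
--     """Converts SQL expression into natural language hint.
--
--     Single left-to-right scan: one pass over the positions of expr collects,
--     case-insensitively, which keyword categories occur (and whether an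
--     arithmetic operator / a digit occurs); the message is then chosen once by
--     category priority, instead of A's one full substring scan per keyword.
--     """
--     if not expr:
--         return ""
--
--     cast = null = rnd = fmt = ext = cond = safe = has_op = has_digit = False
--     for i in range(len(expr)):
--         c = expr[i]
--         if c in ('*', '/', '+', '-'):
--             has_op = True
--         if c.isdigit():
--             has_digit = True
--         cast = cast or _match_ci(expr, i, "CAST(") or _match_ci(expr, i, "SAFE_CAST(")
--         null = null or _match_ci(expr, i, "COALESCE(") or _match_ci(expr, i, "IFNULL(") \
--                     or _match_ci(expr, i, "NULLIF(")
--         rnd = rnd or _match_ci(expr, i, "ROUND(") or _match_ci(expr, i, "CEIL(") \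
--                   or _match_ci(expr, i, "FLOOR(") or _match_ci(expr, i, "TRUNC(")
--         fmt = fmt or _match_ci(expr, i, "UPPER(") or _match_ci(expr, i, "LOWER(") \
--                   or _match_ci(expr, i, "TRIM(") or _match_ci(expr, i, "CONCAT(") \
--                   or _match_ci(expr, i, "SUBSTR(")
--         ext = ext or _match_ci(expr, i, "EXTRACT(")
--         cond = cond or _match_ci(expr, i, "CASE") or _match_ci(expr, i, "IF(")
--         safe = safe or _match_ci(expr, i, "SAFE.")
--
--     if cast:
--         return " (Converted data type)"
--     if null:
--         return " (Handles missing values)"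
--     if rnd:
--         return " (Numerical rounding applied)"
--     if has_op and has_digit:
--         return " (Value adjustment applied)"
--     if fmt:
--         return " (String formatting applied)"
--     if ext:
--         return " (Date/Time component extracted)"
--     if cond:
--         return " (Conditional logic applied)"
--     if safe:
--         return " (Safe execution applied)"
--     return f" (Calculated via logic: `{expr}`)"
-- ===== Notes on version B (the rewrite author's own statement) =====
-- stated objective: alternative
-- what changed: Replaces A's one-full-substring-scan-per-keyword if-chain by a single left-to-right pass over the string that accumulates case-insensitive keyword/operator/digit flags at each position, followed by one priority dispatch on the flags.
import Mathlib
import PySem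

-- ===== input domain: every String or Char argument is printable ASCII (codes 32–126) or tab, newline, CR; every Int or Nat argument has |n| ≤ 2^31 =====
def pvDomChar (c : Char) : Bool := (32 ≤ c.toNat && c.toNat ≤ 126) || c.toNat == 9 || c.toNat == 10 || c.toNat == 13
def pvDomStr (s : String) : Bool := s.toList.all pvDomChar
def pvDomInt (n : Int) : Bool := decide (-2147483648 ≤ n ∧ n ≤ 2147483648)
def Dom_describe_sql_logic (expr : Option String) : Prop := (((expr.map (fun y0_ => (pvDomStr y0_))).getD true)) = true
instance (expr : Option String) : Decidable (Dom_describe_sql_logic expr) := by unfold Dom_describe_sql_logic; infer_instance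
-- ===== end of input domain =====

-- B replaces A's one-full-substring-scan-per-keyword if-chain by a single left-to-right
-- pass that accumulates case-insensitive keyword/operator/digit flags at each position,
-- then dispatches once on the flags (objective: alternative; same cost class).

-- ===== PORT A =====
-- literal transliteration of A's if-chain; `c.isdigit()` on a single char is PySem.Chars.isdigit
def describe_sql_logic (expr : Option String) : String :=
  match expr with
  | none => ""
  | some s =>
    if s == "" then ""
    else
      let eu := PySem.Str.upper s
      if PySem.Str.isIn "CAST(" eu || PySem.Str.isIn "SAFE_CAST(" eu then
        " (Converted data type)"
      else if ["COALESCE(", "IFNULL(", "NULLIF("].any (fun kw => PySem.Str.isIn kw eu) then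
        " (Handles missing values)"
      else if ["ROUND(", "CEIL(", "FLOOR(", "TRUNC("].any (fun kw => PySem.Str.isIn kw eu) then
        " (Numerical rounding applied)"
      else if (["*", "/", "+", "-"].any (fun op => PySem.Str.isIn op s))
              && s.toList.any (fun c => PySem.Chars.isdigit c) then
        " (Value adjustment applied)"
      else if ["UPPER(", "LOWER(", "TRIM(", "CONCAT(", "SUBSTR("].any (fun kw => PySem.Str.isIn kw eu) then
        " (String formatting applied)"
      else if PySem.Str.isIn "EXTRACT(" eu then
        " (Date/Time component extracted)"
      else if PySem.Str.isIn "CASE" eu || PySem.Str.isIn "IF(" eu then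
        " (Conditional logic applied)"
      else if PySem.Str.isIn "SAFE." eu then
        " (Safe execution applied)"
      else
        " (Calculated via logic: `" ++ s ++ "`)"

-- ===== PORT B =====
-- flags accumulated by B's single pass (one Bool per Python flag variable)
structure PvFlags where
  cast : Bool
  null : Bool
  rnd  : Bool
  fmt  : Bool
  ext  : Bool
  cond : Bool
  safe : Bool
  op   : Bool
  dig  : Bool
deriving DecidableEq, Repr

-- port of _match_ci: does kw match the suffix case-insensitively (char-wise upper compare)?
def pvMatchCI : List Char → List Char → Bool
  | [], _ => true
  | _ :: _, [] => false
  | k :: ks, c :: cs => (PySem.Chars.upperChar c == k) && pvMatchCI ks cs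

-- port of B's `for i in range(len(expr))` loop: recursion over the suffixes of the string
def pvScan : List Char → PvFlags → PvFlags
  | [], f => f
  | c :: rest, f =>
    pvScan rest
      { cast := f.cast || pvMatchCI "CAST(".toList (c :: rest) || pvMatchCI "SAFE_CAST(".toList (c :: rest),
        null := f.null || pvMatchCI "COALESCE(".toList (c :: rest) || pvMatchCI "IFNULL(".toList (c :: rest)
                       || pvMatchCI "NULLIF(".toList (c :: rest),
        rnd  := f.rnd || pvMatchCI "ROUND(".toList (c :: rest) || pvMatchCI "CEIL(".toList (c :: rest)
                      || pvMatchCI "FLOOR(".toList (c :: rest) || pvMatchCI "TRUNC(".toList (c :: rest),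
        fmt  := f.fmt || pvMatchCI "UPPER(".toList (c :: rest) || pvMatchCI "LOWER(".toList (c :: rest)
                      || pvMatchCI "TRIM(".toList (c :: rest) || pvMatchCI "CONCAT(".toList (c :: rest)
                      || pvMatchCI "SUBSTR(".toList (c :: rest),
        ext  := f.ext || pvMatchCI "EXTRACT(".toList (c :: rest),
        cond := f.cond || pvMatchCI "CASE".toList (c :: rest) || pvMatchCI "IF(".toList (c :: rest),
        safe := f.safe || pvMatchCI "SAFE.".toList (c :: rest),
        op   := f.op || (c == '*' || c == '/' || c == '+' || c == '-'),
        dig  := f.dig || PySem.Chars.isdigit c }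

def describe_sql_logic_alt (expr : Option String) : String :=
  match expr with
  | none => ""
  | some s =>
    if s == "" then ""
    else
      let f := pvScan s.toList ⟨false, false, false, false, false, false, false, false, false⟩
      if f.cast then " (Converted data type)"
      else if f.null then " (Handles missing values)"
      else if f.rnd then " (Numerical rounding applied)"
      else if f.op && f.dig then " (Value adjustment applied)"
      else if f.fmt then " (String formatting applied)"
      else if f.ext then " (Date/Time component extracted)"
      else if f.cond then " (Conditional logic applied)"
      else if f.safe then " (Safe execution applied)"
      else " (Calculated via logic: `" ++ s ++ "`)"

-- ===== PRECONDITION & SPEC =====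
def Spec_describe_sql_logic (expr : Option String) (out : String) : Prop := out = describe_sql_logic_alt expr
instance (expr : Option String) (out : String) : Decidable (Spec_describe_sql_logic expr out) := by unfold Spec_describe_sql_logic; infer_instance

-- ===== CLAIM =====
def Claim_equal_describe_sql_logic : Prop := ∀ (expr : Option String), Dom_describe_sql_logic expr → Spec_describe_sql_logic expr (describe_sql_logic expr)

-- ===== LEMMAS AND PROOFS =====

-- pvMatchCI kw t decides "kw is a prefix of upper(t)"
theorem pvMatchCI_iff (kw t : List Char) :
    pvMatchCI kw t = true ↔ kw <+: PySem.Chars.upper t := by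
  induction kw generalizing t with
  | nil => simp [pvMatchCI]
  | cons k ks ih =>
    cases t with
    | nil => simp [pvMatchCI, PySem.Chars.upper]
    | cons c cs =>
      show (PySem.Chars.upperChar c == k && pvMatchCI ks cs) = true ↔
        k :: ks <+: PySem.Chars.upperChar c :: PySem.Chars.upper cs
      simp only [Bool.and_eq_true, beq_iff_eq, ih, List.cons_prefix_cons]
      exact and_congr_left' eq_comm

-- substring test on the uppercased string, peeled one position at a time
theorem isIn_upper_cons (kw : List Char) (c : Char) (cs : List Char) :
    PySem.Chars.isIn kw (PySem.Chars.upper (c :: cs)) =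
      (pvMatchCI kw (c :: cs) || PySem.Chars.isIn kw (PySem.Chars.upper cs)) := by
  rw [Bool.eq_iff_iff]
  simp only [Bool.or_eq_true, PySem.Chars.isIn_iff_infix, pvMatchCI_iff]
  show kw <:+: (PySem.Chars.upperChar c :: PySem.Chars.upper cs) ↔ _
  rw [List.infix_cons_iff]
  simp [PySem.Chars.upper]

theorem isIn_upper_nil (kw : List Char) :
    PySem.Chars.isIn kw (PySem.Chars.upper []) = kw.isEmpty := by
  rw [Bool.eq_iff_iff]
  simp [PySem.Chars.isIn_iff_infix, PySem.Chars.upper, List.isEmpty_iff]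

-- what one full scan computes, flag by flag
theorem pvScan_spec (cs : List Char) (f : PvFlags) :
    pvScan cs f =
      { cast := f.cast || PySem.Chars.isIn "CAST(".toList (PySem.Chars.upper cs)
                       || PySem.Chars.isIn "SAFE_CAST(".toList (PySem.Chars.upper cs),
        null := f.null || PySem.Chars.isIn "COALESCE(".toList (PySem.Chars.upper cs)
                       || PySem.Chars.isIn "IFNULL(".toList (PySem.Chars.upper cs)
                       || PySem.Chars.isIn "NULLIF(".toList (PySem.Chars.upper cs),
        rnd  := f.rnd || PySem.Chars.isIn "ROUND(".toList (PySem.Chars.upper cs)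
                      || PySem.Chars.isIn "CEIL(".toList (PySem.Chars.upper cs)
                      || PySem.Chars.isIn "FLOOR(".toList (PySem.Chars.upper cs)
                      || PySem.Chars.isIn "TRUNC(".toList (PySem.Chars.upper cs),
        fmt  := f.fmt || PySem.Chars.isIn "UPPER(".toList (PySem.Chars.upper cs)
                      || PySem.Chars.isIn "LOWER(".toList (PySem.Chars.upper cs)
                      || PySem.Chars.isIn "TRIM(".toList (PySem.Chars.upper cs)
                      || PySem.Chars.isIn "CONCAT(".toList (PySem.Chars.upper cs)
                      || PySem.Chars.isIn "SUBSTR(".toList (PySem.Chars.upper cs),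
        ext  := f.ext || PySem.Chars.isIn "EXTRACT(".toList (PySem.Chars.upper cs),
        cond := f.cond || PySem.Chars.isIn "CASE".toList (PySem.Chars.upper cs)
                       || PySem.Chars.isIn "IF(".toList (PySem.Chars.upper cs),
        safe := f.safe || PySem.Chars.isIn "SAFE.".toList (PySem.Chars.upper cs),
        op   := f.op || cs.any (fun c => c == '*' || c == '/' || c == '+' || c == '-'),
        dig  := f.dig || cs.any PySem.Chars.isdigit } := by
  induction cs generalizing f with
  | nil =>
    cases f
    simp [pvScan, isIn_upper_nil]
  | cons c rest ih =>
    simp only [pvScan, ih, isIn_upper_cons, List.any_cons, PvFlags.mk.injEq]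
    refine ⟨?_, ?_, ?_, ?_, ?_, ?_, ?_, ?_, ?_⟩ <;> ac_rfl

-- Chars.isIn of a single character is membership
theorem isIn_singleton (a : Char) (l : List Char) :
    PySem.Chars.isIn [a] l = l.any (fun c => c == a) := by
  rw [Bool.eq_iff_iff]
  simp [PySem.Chars.isIn_iff_infix, List.singleton_infix_iff, List.any_eq_true]

theorem any_or_distrib (l : List Char) (p q : Char → Bool) :
    l.any (fun x => p x || q x) = (l.any p || l.any q) := by
  rw [Bool.eq_iff_iff]
  simp only [List.any_eq_true, Bool.or_eq_true]
  constructor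
  · rintro ⟨x, hx, h | h⟩
    · exact Or.inl ⟨x, hx, h⟩
    · exact Or.inr ⟨x, hx, h⟩
  · rintro (⟨x, hx, h⟩ | ⟨x, hx, h⟩)
    · exact ⟨x, hx, Or.inl h⟩
    · exact ⟨x, hx, Or.inr h⟩

-- ===== VERDICT =====
theorem describe_sql_logic_spec : Claim_equal_describe_sql_logic := by
  intro expr _
  unfold Spec_describe_sql_logic
  cases expr with
  | none => rfl
  | some s =>
    simp only [describe_sql_logic, describe_sql_logic_alt, pvScan_spec,
      PySem.Str.isIn_eq, PySem.Str.toList_upper, Bool.false_or,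
      List.any_cons, List.any_nil, Bool.or_false, Bool.or_assoc,
      show "*".toList = ['*'] from rfl, show "/".toList = ['/'] from rfl,
      show "+".toList = ['+'] from rfl, show "-".toList = ['-'] from rfl,
      isIn_singleton, any_or_distrib]
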